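-- pv_equiv track=rewrite | github.com/andlamb2002/lambro-trainer | src/Trainer/Scripts/Generate_ZBLL_Cases.py | generate_auf_variations
-- ===== SOURCE A (Python) =====
-- def move_to_int(move):
--     if move == 'U':
--         return 1
--     elif move == 'U2':
--         return 2
--     elif move == "U'":
--         return 3
--     else:
--         return None
--
-- def int_to_move(i):
--     if i == 1:
--         return 'U'
--     elif i == 2:
--         return 'U2'
--     elif i == 3:
--         return "U'"
--     else:
--         return ''
--
-- def merge_adjacent_u_moves(moves_list):
--     result = []
--     i = 0
--     while i < len(moves_list):
--         move = moves_list[i]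
--         if move[0] == 'U':
--             total = move_to_int(move)
--             i += 1
--             while i < len(moves_list) and moves_list[i][0] == 'U':
--                 val = move_to_int(moves_list[i])
--                 if val is not None:
--                     total = (total + val) % 4
--                 i += 1
--             if total != 0:
--                 result.append(int_to_move(total))
--         else:
--             result.append(move)
--             i += 1
--     return result
--
-- def generate_auf_variations(sequence_str: str) -> list[str]:
--     """
--     16 variations with prefix/suffix U-moves; merges adjacent U's.
--     """
--     auf_moves = ['', 'U', "U'", 'U2']
--     variations = []
--     for prefix in auf_moves:
--         for suffix in auf_moves:
--             parts = []
--             if prefix: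
--                 parts.append(prefix)
--             parts.append(sequence_str)
--             if suffix:
--                 parts.append(suffix)
--             combined = ' '.join(parts)
--             moves = combined.split()
--             merged = merge_adjacent_u_moves(moves)
--             variations.append(' '.join(merged))
--     return variations
-- ===== SOURCE B (Python) =====
-- _VALS = {'U': 1, 'U2': 2, "U'": 3}
-- _MOVES = {1: 'U', 2: 'U2', 3: "U'"}
--
--
-- def _emit(t):
--     return [_MOVES[t]] if t else []
--
--
-- def _merge(tokens):
--     # one-pass fold: keep a pending U-run sum (mod 4), flush it before each non-U token
--     out = []
--     pend = 0
--     for t in tokens: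
--         if t.startswith('U'):
--             pend = (pend + _VALS[t]) % 4
--         else:
--             out += _emit(pend)
--             pend = 0
--             out.append(t)
--     return out + _emit(pend)
--
--
-- def _fold_prefix(v, toks):
--     # merge a U-move of value v onto the front of an already-merged token list
--     if toks and toks[0].startswith('U'):
--         return _emit((v + _VALS[toks[0]]) % 4) + toks[1:]
--     return _emit(v) + toks
--
--
-- def _fold_suffix(v, toks):
--     # merge a U-move of value v onto the back of an already-merged token list
--     if toks and toks[-1].startswith('U'):
--         return toks[:-1] + _emit((_VALS[toks[-1]] + v) % 4)
--     return toks + _emit(v)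
--
--
-- def generate_auf_variations(sequence_str: str) -> list[str]:
--     core = _merge(sequence_str.split())
--     variations = []
--     for p in (0, 1, 3, 2):
--         for s in (0, 1, 3, 2):
--             toks = core
--             if p:
--                 toks = _fold_prefix(p, toks)
--             if s:
--                 toks = _fold_suffix(s, toks)
--             variations.append(' '.join(toks))
--     return variations
-- ===== Notes on version B (the rewrite author's own statement) =====
-- stated objective: faster
-- what changed: B merges the sequence once into a normal form (single fold with a pending U-run counter) and then produces each of the 16 variations by constant-size boundary folds of the prefix/suffix U-move into the first/last token, instead of re-joining, re-splitting and re-scanning the whole move list 16 times; Pre_ restricts to the natural move-sequence domain (every token whose first character is the letter U must be a real U-move), since elsewhere A raises TypeError or returns strings padded with an empty token from int_to_move(None) and B raises KeyError.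
-- outside the precondition, e.g. on generate_auf_variations('Uw'): A raises TypeError, B raises KeyError
import Mathlib
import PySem

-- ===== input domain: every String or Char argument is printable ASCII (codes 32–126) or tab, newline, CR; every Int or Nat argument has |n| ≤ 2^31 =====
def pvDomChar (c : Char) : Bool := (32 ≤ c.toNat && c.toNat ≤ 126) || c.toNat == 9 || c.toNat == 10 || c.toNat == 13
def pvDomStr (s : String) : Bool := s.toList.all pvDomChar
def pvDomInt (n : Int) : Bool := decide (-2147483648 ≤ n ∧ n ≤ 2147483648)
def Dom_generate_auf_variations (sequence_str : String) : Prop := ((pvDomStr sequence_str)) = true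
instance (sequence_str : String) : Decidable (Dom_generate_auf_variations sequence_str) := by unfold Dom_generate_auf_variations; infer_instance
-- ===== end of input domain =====

-- B merges the sequence once into a normal form and produces each of the 16 AUF variations by
-- constant-size boundary folds of the prefix/suffix U-move, instead of re-joining, re-splitting
-- and re-merging the whole move list 16 times.


-- ===== PORT A =====
def move_to_int (move : String) : Option Int :=
  if move = "U" then some 1
  else if move = "U2" then some 2
  else if move = "U'" then some 3
  else none

-- int_to_move, applied by A to the possibly-None running total (None compares unequal to 1/2/3 → '')
def int_to_move (i : Option Int) : String :=
  if i = some 1 then "U"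
  else if i = some 2 then "U2"
  else if i = some 3 then "U'"
  else ""

-- move[0] == 'U'; exact for the nonempty tokens str.split() produces (Python raises on "")
def headIsU (m : String) : Bool := m.toList.head? == some 'U'

-- 'if val is not None: total = (total + val) % 4'; a None total with a some val would raise
-- TypeError in Python (excluded by Pre_), modelled here as none
def addU (total val : Option Int) : Option Int :=
  match val, total with
  | none, t => t
  | some _, none => none
  | some v, some t => some (PySem.Int.mod (t + v) 4)

-- the inner while loop of merge_adjacent_u_moves: consume the U-run, return (total, rest)
def runA (total : Option Int) : List String → Option Int × List String
  | [] => (total, [])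
  | m :: rest =>
    if headIsU m then runA (addU total (move_to_int m)) rest else (total, m :: rest)

theorem runA_len_le (total : Option Int) (l : List String) : (runA total l).2.length ≤ l.length := by
  induction l generalizing total with
  | nil => simp [runA]
  | cons m rest ih =>
    simp only [runA]
    split
    · exact Nat.le_succ_of_le (ih _)
    · simp

-- the outer while loop of merge_adjacent_u_moves
def mergeA : List String → List String
  | [] => []
  | m :: rest =>
    if headIsU m then
      let p := runA (move_to_int m) rest
      (if p.1 ≠ some 0 then [int_to_move p.1] else []) ++ mergeA p.2
    else m :: mergeA rest
termination_by l => l.length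
decreasing_by
  · exact Nat.lt_succ_of_le (runA_len_le _ _)
  · simp

def aufMoves : List String := ["", "U", "U'", "U2"]

def generate_auf_variations (sequence_str : String) : List String :=
  aufMoves.foldl (fun variations pre =>
    aufMoves.foldl (fun variations suf =>
      let parts : List String :=
        (if pre ≠ "" then [pre] else []) ++ [sequence_str] ++ (if suf ≠ "" then [suf] else [])
      let combined := PySem.Str.join " " parts
      let moves := PySem.Str.split₀ combined
      variations ++ [PySem.Str.join " " (mergeA moves)]) variations) []

-- ===== PORT B =====
-- _VALS[t] (a 3-key literal dict; outside its keys Python raises KeyError — excluded by Pre_)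
def valsB (t : String) : Int :=
  if t = "U" then 1 else if t = "U2" then 2 else if t = "U'" then 3 else 0

-- _MOVES[i]; only ever applied to i ∈ {1, 2, 3}
def movesB (i : Int) : String :=
  if i = 1 then "U" else if i = 2 then "U2" else "U'"

def emitB (t : Int) : List String := if t ≠ 0 then [movesB t] else []

-- _merge: one fold keeping (out, pending U-run sum mod 4)
def mergeB (tokens : List String) : List String :=
  let p := tokens.foldl (fun (acc : List String × Int) t =>
      if PySem.Str.startswith t "U" then (acc.1, PySem.Int.mod (acc.2 + valsB t) 4)
      else (acc.1 ++ emitB acc.2 ++ [t], 0))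
    ([], 0)
  p.1 ++ emitB p.2

-- _fold_prefix; 'toks and toks[0].startswith(..)' read via headD "" ("" never starts with 'U')
def foldPrefix (v : Int) (toks : List String) : List String :=
  if PySem.Str.startswith (toks.headD "") "U" then
    emitB (PySem.Int.mod (v + valsB (toks.headD "")) 4) ++ toks.tail
  else emitB v ++ toks

-- _fold_suffix, symmetrically via getLastD ""
def foldSuffix (v : Int) (toks : List String) : List String :=
  if PySem.Str.startswith (toks.getLastD "") "U" then
    toks.dropLast ++ emitB (PySem.Int.mod (valsB (toks.getLastD "") + v) 4)
  else toks ++ emitB v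

def generate_auf_variations_alt (sequence_str : String) : List String :=
  let core := mergeB (PySem.Str.split₀ sequence_str)
  ([0, 1, 3, 2] : List Int).foldl (fun variations p =>
    ([0, 1, 3, 2] : List Int).foldl (fun variations s =>
      let toks := core
      let toks := if p ≠ 0 then foldPrefix p toks else toks
      let toks := if s ≠ 0 then foldSuffix s toks else toks
      variations ++ [PySem.Str.join " " toks]) variations) []

-- ===== PRECONDITION & SPEC =====
-- Pre_ restricts to the natural domain of move sequences: every whitespace-separated token whose
-- first character is the letter U must be one of the moves U, U2, U-prime. On other inputs A
-- either raises TypeError (None + int inside a U-run) or returns strings padded with an empty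
-- token from int_to_move(None), while B raises KeyError there.
def Pre_generate_auf_variations (sequence_str : String) : Prop :=
  ∀ t ∈ PySem.Str.split₀ sequence_str, t.toList.head? = some 'U' → t = "U" ∨ t = "U2" ∨ t = "U'"
instance (sequence_str : String) : Decidable (Pre_generate_auf_variations sequence_str) := by
  unfold Pre_generate_auf_variations; infer_instance

def pvWitness_generate_auf_variations : String := "R U R' U'"

def Spec_generate_auf_variations (sequence_str : String) (out : List String) : Prop :=
  out = generate_auf_variations_alt sequence_str
instance (sequence_str : String) (out : List String) : Decidable (Spec_generate_auf_variations sequence_str out) := by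
  unfold Spec_generate_auf_variations; infer_instance

-- ===== CLAIM (what is proved, stated in full; the proofs are below) =====
def Claim_equal_generate_auf_variations : Prop :=
  ∀ (sequence_str : String), Dom_generate_auf_variations sequence_str →
    Pre_generate_auf_variations sequence_str →
      Spec_generate_auf_variations sequence_str (generate_auf_variations sequence_str)

-- ===== LEMMAS AND PROOFS =====

-- the common merged normal form: pending U-run sum (0 ≤ pend < 4), flushed before non-U tokens
def specMerge : Int → List String → List String
  | pend, [] => emitB pend
  | pend, t :: rest =>
    if headIsU t then specMerge (PySem.Int.mod (pend + valsB t) 4) rest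
    else emitB pend ++ t :: specMerge 0 rest

def validToks (l : List String) : Prop :=
  ∀ t ∈ l, t.toList.head? = some 'U' → t = "U" ∨ t = "U2" ∨ t = "U'"

theorem startswith_eq_headIsU (t : String) : PySem.Str.startswith t "U" = headIsU t := by
  simp only [headIsU]
  simp [PySem.Str.startswith, PySem.Chars.startswith]
  cases h : t.toList with
  | nil => simp [List.isPrefixOf]
  | cons c r => simp [List.isPrefixOf, eq_comm]

theorem pymod4 (a : Int) : PySem.Int.mod a 4 = a % 4 :=
  PySem.Int.mod_eq_emod_of_pos (by norm_num)

theorem mergeB_go (l : List String) : ∀ (out : List String) (pend : Int),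
    (let p := l.foldl (fun (acc : List String × Int) t =>
      if headIsU t then (acc.1, PySem.Int.mod (acc.2 + valsB t) 4)
      else (acc.1 ++ emitB acc.2 ++ [t], 0)) (out, pend)
     p.1 ++ emitB p.2) = out ++ specMerge pend l := by
  induction l with
  | nil => intro out pend; simp [specMerge]
  | cons t r ih =>
    intro out pend
    simp only [List.foldl_cons, specMerge]
    split
    · exact ih out _
    · rw [ih]; simp [emitB]

theorem mergeB_eq_spec (l : List String) : mergeB l = specMerge 0 l := by
  have h := mergeB_go l [] 0
  simp only [List.nil_append] at h
  rw [mergeB]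
  simp only [startswith_eq_headIsU]
  exact h

theorem valid_move (t : String) (ht : t = "U" ∨ t = "U2" ∨ t = "U'") :
    move_to_int t = some (valsB t) ∧ 1 ≤ valsB t ∧ valsB t < 4 := by
  rcases ht with h | h | h <;> subst h <;> refine ⟨rfl, by decide, by decide⟩

theorem runA_spec (l : List String) : ∀ v : Int, validToks l → 0 ≤ v → v < 4 →
    ∃ p rest2, runA (some v) l = (some p, rest2) ∧ 0 ≤ p ∧ p < 4 ∧
      rest2.length ≤ l.length ∧ validToks rest2 ∧
      specMerge v l = emitB p ++ specMerge 0 rest2 := by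
  induction l with
  | nil =>
    intro v _ h0 h4
    exact ⟨v, [], rfl, h0, h4, by simp, by intro t ht; simp at ht, by simp [specMerge, emitB]⟩
  | cons t r ih =>
    intro v hv h0 h4
    by_cases hU : headIsU t
    · have htv : t = "U" ∨ t = "U2" ∨ t = "U'" := by
        apply hv t (by simp)
        simpa [headIsU] using hU
      obtain ⟨hm, hv1, hv4⟩ := valid_move t htv
      have hvr : validToks r := fun x hx => hv x (by simp [hx])
      have hmod0 : 0 ≤ PySem.Int.mod (v + valsB t) 4 := PySem.Int.mod_nonneg _ (by norm_num)
      have hmod4 : PySem.Int.mod (v + valsB t) 4 < 4 := PySem.Int.mod_lt _ (by norm_num)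
      obtain ⟨p, rest2, heq, hp0, hp4, hlen, hvr2, hspec⟩ := ih _ hvr hmod0 hmod4
      refine ⟨p, rest2, ?_, hp0, hp4, Nat.le_succ_of_le hlen, hvr2, ?_⟩
      · simpa [runA, hU, hm, addU] using heq
      · rw [specMerge, if_pos hU]
        exact hspec
    · refine ⟨v, t :: r, by simp [runA, hU], h0, h4, le_refl _, hv, ?_⟩
      rw [specMerge, if_neg hU, specMerge, if_neg hU]
      simp [emitB]

theorem int_to_move_eq (p : Int) (h1 : 1 ≤ p) (h4 : p < 4) :
    int_to_move (some p) = movesB p := by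
  interval_cases p <;> rfl

theorem mergeA_eq_spec (l : List String) (hv : validToks l) : mergeA l = specMerge 0 l := by
  induction hn : l.length using Nat.strong_induction_on generalizing l with
  | _ n ihn =>
  subst hn
  match l with
  | [] => simp [mergeA, specMerge, emitB]
  | t :: r =>
    have hvr : validToks r := fun x hx => hv x (by simp [hx])
    by_cases hU : headIsU t
    · have htv : t = "U" ∨ t = "U2" ∨ t = "U'" := by
        apply hv t (by simp)
        simpa [headIsU] using hU
      obtain ⟨hm, hv1, hv4⟩ := valid_move t htv
      obtain ⟨p, rest2, heq, hp0, hp4, hlen, hvr2, hspec⟩ :=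
        runA_spec r (valsB t) hvr (by omega) hv4
      rw [mergeA]
      rw [if_pos hU, hm, heq]
      simp only []
      have hrec : mergeA rest2 = specMerge 0 rest2 :=
        ihn rest2.length (by simpa using Nat.lt_succ_of_le hlen) rest2 hvr2 rfl
      show (if some p ≠ some 0 then [int_to_move (some p)] else []) ++ mergeA rest2 = _
      rw [hrec]
      rw [specMerge, if_pos hU]
      have h04 : PySem.Int.mod (0 + valsB t) 4 = valsB t := by
        rw [pymod4]; omega
      rw [h04, hspec]
      by_cases hp : p = 0
      · subst hp; simp [emitB]
      · simp only [emitB, if_pos (by simpa using hp)]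
        rw [if_pos (by simpa using hp)]
        rw [int_to_move_eq p (by omega) hp4]
    · rw [mergeA, if_neg hU]
      rw [specMerge, if_neg hU]
      simp [emitB]
      exact ihn r.length (by simp) r hvr rfl

-- sum / tail after the leading U-run
def runSum : List String → Int
  | [] => 0
  | t :: r => if headIsU t then valsB t + runSum r else 0

def restPart : List String → List String
  | [] => []
  | t :: r => if headIsU t then restPart r else t :: r

theorem specMerge_decomp (l : List String) : ∀ pend : Int, 0 ≤ pend → pend < 4 →
    specMerge pend l = emitB (PySem.Int.mod (pend + runSum l) 4) ++ specMerge 0 (restPart l) := by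
  induction l with
  | nil =>
    intro pend h0 h4
    have hm : PySem.Int.mod (pend + runSum []) 4 = pend := by
      rw [runSum, pymod4]; omega
    rw [restPart, hm]
    simp [specMerge, emitB]
  | cons t r ih =>
    intro pend h0 h4
    by_cases hU : headIsU t
    · rw [specMerge, if_pos hU, runSum, if_pos hU, restPart, if_pos hU]
      rw [ih _ (PySem.Int.mod_nonneg _ (by norm_num)) (PySem.Int.mod_lt _ (by norm_num))]
      congr 2
      simp only [pymod4]
      omega
    · rw [specMerge, if_neg hU, runSum, if_neg hU, restPart, if_neg hU]
      have hm : PySem.Int.mod (pend + 0) 4 = pend := by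
        rw [pymod4]; omega
      rw [hm, specMerge, if_neg hU]
      simp [emitB]

theorem movesB_mem (p : Int) : movesB p = "U" ∨ movesB p = "U2" ∨ movesB p = "U'" := by
  unfold movesB; split_ifs <;> simp

theorem headIsU_movesB (p : Int) : headIsU (movesB p) = true := by
  unfold movesB; split_ifs <;> decide

theorem valsB_movesB (p : Int) (h1 : 1 ≤ p) (h4 : p < 4) : valsB (movesB p) = p := by
  interval_cases p <;> decide

theorem restPart_cases (l : List String) :
    restPart l = [] ∨ ∃ t r, restPart l = t :: r ∧ headIsU t = false := by
  induction l with
  | nil => left; rfl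
  | cons t r ih =>
    by_cases hU : headIsU t
    · rw [restPart, if_pos hU]; exact ih
    · right; exact ⟨t, r, by rw [restPart, if_neg hU], by simpa using hU⟩

theorem spec_restPart_head (l : List String) :
    specMerge 0 (restPart l) = [] ∨
      ∃ t r', specMerge 0 (restPart l) = t :: r' ∧ headIsU t = false := by
  rcases restPart_cases l with h | ⟨t, r, h, hU⟩
  · left; rw [h]; simp [specMerge, emitB]
  · right
    rw [h, specMerge, if_neg (by simp [hU])]
    exact ⟨t, specMerge 0 r, by simp [emitB], hU⟩

theorem foldPrefix_spec (l : List String) (pv : Int) (h1 : 1 ≤ pv) (h4 : pv < 4) :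
    specMerge 0 (movesB pv :: l) = foldPrefix pv (specMerge 0 l) := by
  rw [specMerge.eq_2, if_pos (headIsU_movesB pv)]
  have hmv : PySem.Int.mod (0 + valsB (movesB pv)) 4 = pv := by
    rw [valsB_movesB pv h1 h4, pymod4]; omega
  rw [hmv, specMerge_decomp l pv (by omega) h4, specMerge_decomp l 0 (by norm_num) (by norm_num)]
  by_cases h0 : PySem.Int.mod (0 + runSum l) 4 = 0
  · have harg : PySem.Int.mod (pv + runSum l) 4 = pv := by
      simp only [pymod4] at h0 ⊢; omega
    rw [harg, h0, show emitB (0 : Int) = [] from rfl, List.nil_append]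
    have hpv : emitB pv = [movesB pv] := by
      rw [emitB, if_pos (by simpa using show pv ≠ 0 by omega)]
    rcases spec_restPart_head l with h | ⟨t, r', h, hU⟩ <;> rw [h]
    · rw [foldPrefix, if_neg (by rw [startswith_eq_headIsU]; decide), hpv]
    · rw [foldPrefix, if_neg (by rw [startswith_eq_headIsU]; simp [hU]), hpv]
  · have hT0 : 0 ≤ PySem.Int.mod (0 + runSum l) 4 := PySem.Int.mod_nonneg _ (by norm_num)
    have hT4 : PySem.Int.mod (0 + runSum l) 4 < 4 := PySem.Int.mod_lt _ (by norm_num)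
    rw [show emitB (PySem.Int.mod (0 + runSum l) 4) = [movesB (PySem.Int.mod (0 + runSum l) 4)] by
      rw [emitB, if_pos (by simpa using h0)]]
    rw [List.singleton_append, foldPrefix,
      if_pos (by rw [startswith_eq_headIsU]; simp [headIsU_movesB]),
      List.headD_cons, List.tail_cons, valsB_movesB _ (by omega) hT4]
    have harg : PySem.Int.mod (pv + runSum l) 4 =
        PySem.Int.mod (pv + PySem.Int.mod (0 + runSum l) 4) 4 := by
      simp only [pymod4]; omega
    rw [harg]

theorem foldSuffix_append (sv : Int) (X L : List String) (hL : L ≠ []) :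
    foldSuffix sv (X ++ L) = X ++ foldSuffix sv L := by
  match L, hL with
  | x :: xs, _ =>
    rw [foldSuffix, foldSuffix]
    rw [show (X ++ x :: xs).getLastD "" = (x :: xs).getLastD "" by
      rw [List.getLastD_eq_getLast?, List.getLastD_eq_getLast?, List.getLast?_append_cons]]
    rw [List.dropLast_append_of_ne_nil (by simp)]
    split <;> simp

theorem foldSuffix_spec (l : List String) : ∀ pend : Int, 0 ≤ pend → pend < 4 →
    ∀ sv : Int, 1 ≤ sv → sv < 4 →
      specMerge pend (l ++ [movesB sv]) = foldSuffix sv (specMerge pend l) := by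
  induction l with
  | nil =>
    intro pend h0 h4 sv hs1 hs4
    rw [List.nil_append, specMerge.eq_2, if_pos (headIsU_movesB sv), valsB_movesB sv hs1 hs4,
      specMerge.eq_1, specMerge.eq_1]
    by_cases hp : pend = 0
    · subst hp
      rw [show emitB (0 : Int) = [] from rfl]
      rw [foldSuffix, if_neg (by rw [startswith_eq_headIsU]; decide), List.nil_append]
      have harg : PySem.Int.mod (0 + sv) 4 = sv := by rw [pymod4]; omega
      rw [harg, emitB, if_pos (by simpa using show sv ≠ 0 by omega)]
    · rw [show emitB pend = [movesB pend] by rw [emitB, if_pos (by simpa using hp)]]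
      rw [foldSuffix,
        if_pos (by rw [startswith_eq_headIsU]; simp [List.getLastD, headIsU_movesB])]
      rw [show ([movesB pend] : List String).getLastD "" = movesB pend from rfl,
        show ([movesB pend] : List String).dropLast = [] from rfl, List.nil_append,
        valsB_movesB pend (by omega) h4]
  | cons t r ih =>
    intro pend h0 h4 sv hs1 hs4
    by_cases hU : headIsU t
    · rw [List.cons_append, specMerge, if_pos hU, specMerge, if_pos hU]
      exact ih _ (PySem.Int.mod_nonneg _ (by norm_num)) (PySem.Int.mod_lt _ (by norm_num)) sv hs1 hs4
    · rw [List.cons_append, specMerge, if_neg hU, specMerge, if_neg hU]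
      rw [ih 0 (by norm_num) (by norm_num) sv hs1 hs4]
      rw [show emitB pend ++ t :: specMerge 0 r = (emitB pend ++ [t]) ++ specMerge 0 r by simp,
          show emitB pend ++ t :: foldSuffix sv (specMerge 0 r) =
            (emitB pend ++ [t]) ++ foldSuffix sv (specMerge 0 r) by simp]
      by_cases hr : specMerge 0 r = []
      · rw [hr, List.append_nil]
        have hnil : foldSuffix sv ([] : List String) = emitB sv := by
          rw [foldSuffix, if_neg (by rw [startswith_eq_headIsU]; decide)]
          rfl
        have hlast : foldSuffix sv (emitB pend ++ [t]) = (emitB pend ++ [t]) ++ emitB sv := by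
          rw [foldSuffix, if_neg (by
            rw [show ((emitB pend ++ [t]).getLastD "") = t from by
              rw [List.getLastD_eq_getLast?, List.getLast?_append_cons]; rfl]
            rw [startswith_eq_headIsU]; simpa using hU)]
        rw [hnil, hlast, List.append_assoc]
      · rw [foldSuffix_append sv (emitB pend ++ [t]) (specMerge 0 r) hr]

theorem validToks_append (l1 l2 : List String) (h1 : validToks l1) (h2 : validToks l2) :
    validToks (l1 ++ l2) := by
  intro t ht
  rcases List.mem_append.mp ht with h | h
  · exact h1 t h
  · exact h2 t h

theorem validToks_emitB (p : Int) : validToks (emitB p) := by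
  intro t ht
  rw [emitB] at ht
  split at ht
  · simp at ht; subst ht; intro _; exact movesB_mem p
  · simp at ht

theorem pair_eq (toks : List String) (hv : validToks toks) (pv sv : Int)
    (hp0 : 0 ≤ pv) (hp4 : pv < 4) (hs0 : 0 ≤ sv) (hs4 : sv < 4) :
    mergeA (emitB pv ++ toks ++ emitB sv) =
      (if sv ≠ 0 then foldSuffix sv ((if pv ≠ 0 then foldPrefix pv else id) (specMerge 0 toks))
       else (if pv ≠ 0 then foldPrefix pv else id) (specMerge 0 toks)) := by
  have hvfull : validToks (emitB pv ++ toks ++ emitB sv) :=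
    validToks_append _ _ (validToks_append _ _ (validToks_emitB pv) hv) (validToks_emitB sv)
  rw [mergeA_eq_spec _ hvfull]
  have hpre : specMerge 0 (emitB pv ++ toks) =
      (if pv ≠ 0 then foldPrefix pv else id) (specMerge 0 toks) := by
    by_cases hp : pv = 0
    · subst hp; simp [emitB]
    · rw [if_pos (by simpa using hp),
        show emitB pv = [movesB pv] by rw [emitB, if_pos (by simpa using hp)],
        List.singleton_append]
      exact foldPrefix_spec toks pv (by omega) hp4
  by_cases hs : sv = 0
  · subst hs
    rw [if_neg (by simp), show emitB (0 : Int) = [] from rfl, List.append_nil]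
    exact hpre
  · rw [if_pos (by simpa using hs)]
    have : emitB pv ++ toks ++ emitB sv = (emitB pv ++ toks) ++ [movesB sv] := by
      simp [emitB, hs]
    rw [this, foldSuffix_spec (emitB pv ++ toks) 0 (by norm_num) (by norm_num) sv (by omega) hs4,
        hpre]

-- ---- Python str.split() of single-token/space concatenations ----

theorem go_acc (cs : List Char) : ∀ (cur : List Char) (acc : List (List Char)),
    PySem.Chars.split₀.go cs cur acc = acc.reverse ++ PySem.Chars.split₀.go cs cur [] := by
  induction cs with
  | nil =>
    intro cur acc
    rw [PySem.Chars.split₀.go, PySem.Chars.split₀.go]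
    split <;> simp
  | cons c rest ih =>
    intro cur acc
    rw [PySem.Chars.split₀.go]
    conv_rhs => rw [PySem.Chars.split₀.go]
    split
    · split
      · exact ih [] acc
      · rw [ih [] (cur.reverse :: acc), ih [] [cur.reverse]]
        simp
    · exact ih (c :: cur) acc

theorem go_token (w : List Char) : ∀ (cs cur : List Char) (acc : List (List Char)),
    (∀ c ∈ w, PySem.Chars.isspace c = false) →
    PySem.Chars.split₀.go (w ++ cs) cur acc = PySem.Chars.split₀.go cs (w.reverse ++ cur) acc := by
  induction w with
  | nil => intro cs cur acc _; simp
  | cons c rest ih =>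
    intro cs cur acc hns
    rw [List.cons_append, PySem.Chars.split₀.go]
    rw [if_neg (by simp [hns c (by simp)])]
    rw [ih cs (c :: cur) acc (fun x hx => hns x (by simp [hx]))]
    simp

theorem split₀_prefix (w cs : List Char) (hw : w ≠ [])
    (hns : ∀ c ∈ w, PySem.Chars.isspace c = false) :
    PySem.Chars.split₀ (w ++ ' ' :: cs) = w :: PySem.Chars.split₀ cs := by
  rw [PySem.Chars.split₀, go_token w (' ' :: cs) [] [] hns]
  rw [PySem.Chars.split₀.go]
  rw [if_pos (show PySem.Chars.isspace ' ' = true from rfl)]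
  rw [if_neg (by simpa using hw)]
  simp only [List.append_nil, List.reverse_reverse]
  rw [go_acc cs [] [w]]
  simp [PySem.Chars.split₀]

theorem go_suffix (cs : List Char) : ∀ (w : List Char) (cur : List Char) (acc : List (List Char)),
    w ≠ [] → (∀ c ∈ w, PySem.Chars.isspace c = false) →
    PySem.Chars.split₀.go (cs ++ ' ' :: w) cur acc = PySem.Chars.split₀.go cs cur acc ++ [w] := by
  induction cs with
  | nil =>
    intro w cur acc hw hns
    rw [List.nil_append]
    have hL : PySem.Chars.split₀.go (' ' :: w) cur acc =
        if PySem.Chars.isspace ' ' then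
          (if cur.isEmpty then PySem.Chars.split₀.go w [] acc
           else PySem.Chars.split₀.go w [] (cur.reverse :: acc))
        else PySem.Chars.split₀.go w (' ' :: cur) acc := by
      rw [PySem.Chars.split₀.go]
    have hR : PySem.Chars.split₀.go [] cur acc =
        if cur.isEmpty then acc.reverse else (cur.reverse :: acc).reverse := by
      rw [PySem.Chars.split₀.go]
    rw [hL, if_pos (show PySem.Chars.isspace ' ' = true from rfl), hR]
    have hW : ∀ acc2 : List (List Char), PySem.Chars.split₀.go w [] acc2 = acc2.reverse ++ [w] := by
      intro acc2
      rw [show PySem.Chars.split₀.go w ([] : List Char) acc2 =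
          PySem.Chars.split₀.go (w ++ []) [] acc2 by rw [List.append_nil]]
      rw [go_token w [] [] acc2 hns, PySem.Chars.split₀.go]
      rw [if_neg (by simpa using hw)]
      simp
    by_cases hc : cur.isEmpty = true
    · rw [if_pos hc, if_pos hc, hW acc]
    · rw [if_neg hc, if_neg hc, hW (cur.reverse :: acc)]
  | cons c rest ih =>
    intro w cur acc hw hns
    rw [List.cons_append, PySem.Chars.split₀.go]
    conv_rhs => rw [PySem.Chars.split₀.go]
    split
    · split
      · exact ih w [] acc hw hns
      · exact ih w [] (cur.reverse :: acc) hw hns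
    · exact ih w (c :: cur) acc hw hns

theorem split₀_suffix (cs w : List Char) (hw : w ≠ [])
    (hns : ∀ c ∈ w, PySem.Chars.isspace c = false) :
    PySem.Chars.split₀ (cs ++ ' ' :: w) = PySem.Chars.split₀ cs ++ [w] := by
  rw [PySem.Chars.split₀, go_suffix cs w [] [] hw hns, PySem.Chars.split₀]

theorem toList_map_inj (l1 l2 : List String) (h : l1.map String.toList = l2.map String.toList) :
    l1 = l2 := by
  induction l1 generalizing l2 with
  | nil => cases l2 <;> simp_all
  | cons x xs ih =>
    cases l2 with
    | nil => simp_all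
    | cons y ys =>
      simp only [List.map_cons, List.cons.injEq] at h
      exact by rw [String.toList_inj.mp h.1, ih ys h.2]

-- Str-level corollaries used on the 16 concrete (prefix, suffix) shapes
theorem str_split_join_one (s : String) : PySem.Str.split₀ (PySem.Str.join " " [s]) = PySem.Str.split₀ s := by
  have : PySem.Str.join " " [s] = s := by
    apply String.toList_inj.mp
    simp [PySem.Str.toList_join, PySem.Chars.join, List.intercalate]
  rw [this]

theorem str_split_join_pre (w s : String) (hw : w.toList ≠ [])
    (hns : ∀ c ∈ w.toList, PySem.Chars.isspace c = false) :
    PySem.Str.split₀ (PySem.Str.join " " [w, s]) = w :: PySem.Str.split₀ s := by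
  apply toList_map_inj
  rw [PySem.Str.split₀_map_toList]
  have hjl : (PySem.Str.join " " [w, s]).toList = w.toList ++ ' ' :: s.toList := by
    simp [PySem.Str.toList_join, PySem.Chars.join, List.intercalate]
  rw [hjl, split₀_prefix _ _ hw hns]
  simp [PySem.Str.split₀_map_toList]

theorem str_split_join_suf (s w : String) (hw : w.toList ≠ [])
    (hns : ∀ c ∈ w.toList, PySem.Chars.isspace c = false) :
    PySem.Str.split₀ (PySem.Str.join " " [s, w]) = PySem.Str.split₀ s ++ [w] := by
  apply toList_map_inj
  rw [PySem.Str.split₀_map_toList]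
  have hjl : (PySem.Str.join " " [s, w]).toList = s.toList ++ ' ' :: w.toList := by
    simp [PySem.Str.toList_join, PySem.Chars.join, List.intercalate]
  rw [hjl, split₀_suffix _ _ hw hns]
  simp [PySem.Str.split₀_map_toList]

theorem str_split_join_both (w1 s w2 : String) (hw1 : w1.toList ≠ [])
    (hns1 : ∀ c ∈ w1.toList, PySem.Chars.isspace c = false) (hw2 : w2.toList ≠ [])
    (hns2 : ∀ c ∈ w2.toList, PySem.Chars.isspace c = false) :
    PySem.Str.split₀ (PySem.Str.join " " [w1, s, w2]) = w1 :: PySem.Str.split₀ s ++ [w2] := by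
  apply toList_map_inj
  rw [PySem.Str.split₀_map_toList]
  have hjl : (PySem.Str.join " " [w1, s, w2]).toList =
      w1.toList ++ ' ' :: (s.toList ++ ' ' :: w2.toList) := by
    simp [PySem.Str.toList_join, PySem.Chars.join, List.intercalate]
  rw [hjl, split₀_prefix _ _ hw1 hns1, split₀_suffix _ _ hw2 hns2]
  simp [PySem.Str.split₀_map_toList]

-- one variation, at the Str level
theorem variation_eq (s : String) (hpre : Pre_generate_auf_variations s) (pv sv : Int)
    (hp0 : 0 ≤ pv) (hp4 : pv < 4) (hs0 : 0 ≤ sv) (hs4 : sv < 4) :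
    PySem.Str.join " " (mergeA (PySem.Str.split₀ (PySem.Str.join " "
        ((if pv ≠ 0 then [movesB pv] else []) ++ [s] ++ (if sv ≠ 0 then [movesB sv] else []))))) =
      PySem.Str.join " "
        ((if sv ≠ 0 then foldSuffix sv ((if pv ≠ 0 then foldPrefix pv else id)
            (mergeB (PySem.Str.split₀ s)))
          else (if pv ≠ 0 then foldPrefix pv else id) (mergeB (PySem.Str.split₀ s)))) := by
  have hv : validToks (PySem.Str.split₀ s) := hpre
  have hwm : ∀ p : Int, (movesB p).toList ≠ [] ∧
      ∀ c ∈ (movesB p).toList, PySem.Chars.isspace c = false := by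
    intro p
    rcases movesB_mem p with h | h | h <;> rw [h] <;>
      exact ⟨by decide, by intro c hc; fin_cases hc <;> rfl⟩
  have hsplit : PySem.Str.split₀ (PySem.Str.join " "
      ((if pv ≠ 0 then [movesB pv] else []) ++ [s] ++ (if sv ≠ 0 then [movesB sv] else []))) =
      emitB pv ++ PySem.Str.split₀ s ++ emitB sv := by
    by_cases hp : pv = 0 <;> by_cases hs : sv = 0
    · subst hp; subst hs
      rw [show (if (0 : Int) ≠ 0 then [movesB 0] else []) = ([] : List String) from rfl,
        show emitB (0 : Int) = [] from rfl,
        List.nil_append, List.nil_append, List.append_nil, List.append_nil]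
      exact str_split_join_one s
    · subst hp
      rw [if_pos hs, show (if (0 : Int) ≠ 0 then [movesB 0] else []) = ([] : List String) from rfl,
        show emitB (0 : Int) = [] from rfl,
        show emitB sv = [movesB sv] by rw [emitB, if_pos hs],
        List.nil_append, List.nil_append,
        show ([s] : List String) ++ [movesB sv] = [s, movesB sv] from rfl]
      exact str_split_join_suf s (movesB sv) (hwm sv).1 (hwm sv).2
    · subst hs
      rw [if_pos hp, show (if (0 : Int) ≠ 0 then [movesB 0] else []) = ([] : List String) from rfl,
        show emitB (0 : Int) = [] from rfl,
        show emitB pv = [movesB pv] by rw [emitB, if_pos hp],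
        List.append_nil, List.append_nil,
        show ([movesB pv] : List String) ++ [s] = [movesB pv, s] from rfl,
        str_split_join_pre (movesB pv) s (hwm pv).1 (hwm pv).2]
      rfl
    · rw [if_pos hp, if_pos hs,
        show emitB pv = [movesB pv] by rw [emitB, if_pos hp],
        show emitB sv = [movesB sv] by rw [emitB, if_pos hs],
        show ([movesB pv] : List String) ++ [s] ++ [movesB sv] = [movesB pv, s, movesB sv] from rfl,
        str_split_join_both (movesB pv) s (movesB sv) (hwm pv).1 (hwm pv).2 (hwm sv).1 (hwm sv).2]
      rfl
  rw [hsplit, pair_eq (PySem.Str.split₀ s) hv pv sv hp0 hp4 hs0 hs4, mergeB_eq_spec]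

-- ===== VERDICT (by name: the statement is the Claim_ definition above) =====
set_option maxHeartbeats 2000000 in
theorem generate_auf_variations_spec : Claim_equal_generate_auf_variations := by
  intro s _ hpre
  unfold Spec_generate_auf_variations
  have h := fun pv sv hp0 hp4 hs0 hs4 => variation_eq s hpre pv sv hp0 hp4 hs0 hs4
  have h00 := h 0 0 (by norm_num) (by norm_num) (by norm_num) (by norm_num)
  have h01 := h 0 1 (by norm_num) (by norm_num) (by norm_num) (by norm_num)
  have h03 := h 0 3 (by norm_num) (by norm_num) (by norm_num) (by norm_num)
  have h02 := h 0 2 (by norm_num) (by norm_num) (by norm_num) (by norm_num)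
  have h10 := h 1 0 (by norm_num) (by norm_num) (by norm_num) (by norm_num)
  have h11 := h 1 1 (by norm_num) (by norm_num) (by norm_num) (by norm_num)
  have h13 := h 1 3 (by norm_num) (by norm_num) (by norm_num) (by norm_num)
  have h12 := h 1 2 (by norm_num) (by norm_num) (by norm_num) (by norm_num)
  have h30 := h 3 0 (by norm_num) (by norm_num) (by norm_num) (by norm_num)
  have h31 := h 3 1 (by norm_num) (by norm_num) (by norm_num) (by norm_num)
  have h33 := h 3 3 (by norm_num) (by norm_num) (by norm_num) (by norm_num)
  have h32 := h 3 2 (by norm_num) (by norm_num) (by norm_num) (by norm_num)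
  have h20 := h 2 0 (by norm_num) (by norm_num) (by norm_num) (by norm_num)
  have h21 := h 2 1 (by norm_num) (by norm_num) (by norm_num) (by norm_num)
  have h23 := h 2 3 (by norm_num) (by norm_num) (by norm_num) (by norm_num)
  have h22 := h 2 2 (by norm_num) (by norm_num) (by norm_num) (by norm_num)
  simp only [generate_auf_variations, generate_auf_variations_alt, aufMoves,
    List.foldl_cons, List.foldl_nil, List.nil_append, List.append_nil,
    String.reduceEq, ne_eq, reduceIte, not_false_eq_true, not_true_eq_false] at *
  norm_num [movesB] at h00 h01 h03 h02 h10 h11 h13 h12 h30 h31 h33 h32 h20 h21 h23 h22 ⊢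
  rw [h00, h01, h03, h02, h10, h11, h13, h12, h30, h31, h33, h32, h20, h21, h23, h22]
  exact ⟨rfl, rfl, rfl, rfl, rfl, rfl, rfl, rfl, rfl, rfl, rfl, rfl, rfl, rfl, rfl, rfl⟩
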